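-- pv_equiv track=rewrite | github.com/Kawser-nerd/CLCDSA | Source Codes/AtCoder/abc020/D/3887084.py | sum_coprime
-- ===== SOURCE A (Python) =====
-- MOD = 10**9+7
--
-- def calc_factors(n):
--     ret = set()
--     m = 2
--     while m*m <= n:
--         while n%m == 0:
--             n //= m
--             ret.add(m)
--         m += 1
--     if n > 1:
--         ret.add(n)
--     return ret
--
-- def sum_coprime(maxn,k):
--     ret = 0
--     factors = calc_factors(k)
--     for b in range(1<<len(factors)):
--         sign = 1
--         mul = 1
--         for i,f in enumerate(factors):
--             if b&(1<<i):
--                 sign *= -1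
--                 mul *= f
--         ret += sign * mul * (maxn//mul) * (maxn//mul+1) //2
--         ret %= MOD
--     return ret
-- ===== SOURCE B (Python) =====
-- MOD = 10**9+7
--
-- def calc_factors(n):
--     ret = set()
--     m = 2
--     while m*m <= n:
--         while n%m == 0:
--             n //= m
--             ret.add(m)
--         m += 1
--     if n > 1:
--         ret.add(n)
--     return ret
--
-- def sum_coprime(maxn, k):
--     # divide-and-conquer on the prime list: S(n, i) = sum of 1..n coprime
--     # to primes[i:], via S(n,i) = S(n,i+1) - p*S(n//p,i+1); no subset
--     # enumeration, no sign/product bookkeeping.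
--     primes = list(calc_factors(k))
--     def s(n, i):
--         if i == len(primes):
--             return n * (n + 1) // 2
--         p = primes[i]
--         return s(n, i + 1) - p * s(n // p, i + 1)
--     return s(maxn, 0) % MOD
-- ===== Notes on version B (the rewrite author's own statement) =====
-- stated objective: alternative
-- what changed: Replaced the 2^f bitmask subset enumeration (recomputing sign and product from the bits of b and reducing mod MOD every iteration) by a divide-and-conquer recursion on the prime list that shrinks the bound, S(n,i) = S(n,i+1) - p*S(n//p,i+1) with triangular-number base case, reduced mod MOD once.
import Mathlib
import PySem

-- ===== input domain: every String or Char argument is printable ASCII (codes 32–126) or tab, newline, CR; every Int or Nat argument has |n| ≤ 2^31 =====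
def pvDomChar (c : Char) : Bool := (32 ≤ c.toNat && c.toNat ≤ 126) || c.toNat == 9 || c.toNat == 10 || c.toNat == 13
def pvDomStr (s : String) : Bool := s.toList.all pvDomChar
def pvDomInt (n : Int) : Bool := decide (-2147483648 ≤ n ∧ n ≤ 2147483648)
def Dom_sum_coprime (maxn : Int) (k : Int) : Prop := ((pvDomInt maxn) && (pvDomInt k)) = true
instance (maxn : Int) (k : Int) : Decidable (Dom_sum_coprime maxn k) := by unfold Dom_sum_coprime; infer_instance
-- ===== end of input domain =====

-- B replaces the 2^f bitmask subset enumeration by a divide-and-conquer recursion on the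
-- prime list that shrinks the bound (S(n,ps) = S(n,ps') - p*S(n//p,ps')); objective: alternative.

-- ===== PORT A =====
def pvMOD : Int := 10 ^ 9 + 7

-- inner 'while n%m == 0: n //= m; ret.add(m)' of calc_factors; fuel only makes it total
-- (it is ≥ the number of divisions actually performed, so it never cuts the loop short)
def pvCFInner : Nat → Int → Int → PySem.Set Int → Int × PySem.Set Int
  | 0, n, _, ret => (n, ret)
  | f + 1, n, m, ret =>
    if PySem.Int.mod n m = 0 then
      pvCFInner f (PySem.Int.floordiv n m) m (PySem.Set.add ret m)
    else (n, ret)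

-- outer 'while m*m <= n: …; m += 1' of calc_factors; same remark about the fuel
def pvCFOuter : Nat → Int → Int → PySem.Set Int → Int × PySem.Set Int
  | 0, n, _, ret => (n, ret)
  | f + 1, n, m, ret =>
    if m * m ≤ n then
      let p := pvCFInner n.natAbs n m ret
      pvCFOuter f p.1 (m + 1) p.2
    else (n, ret)

def pvCalcFactors (n : Int) : PySem.Set Int :=
  let p := pvCFOuter (n.natAbs + 2) n 2 PySem.Set.empty
  if p.1 > 1 then PySem.Set.add p.2 p.1 else p.2

-- 'for i,f in enumerate(factors): if b&(1<<i): sign *= -1; mul *= f'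
def pvSubsetFold : Nat → Nat → List Int → Int × Int → Int × Int
  | _, _, [], sm => sm
  | b, i, f :: fs, sm =>
    pvSubsetFold b (i + 1) fs (if b &&& (1 <<< i) ≠ 0 then (-sm.1, sm.2 * f) else sm)

def sum_coprime (maxn : Int) (k : Int) : Int :=
  let fs : List Int := pvCalcFactors k
  (List.range (1 <<< fs.length)).foldl
    (fun ret b =>
      let sm := pvSubsetFold b 0 fs (1, 1)
      let q := PySem.Int.floordiv maxn sm.2
      PySem.Int.mod (ret + PySem.Int.floordiv (sm.1 * sm.2 * q * (q + 1)) 2) pvMOD)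
    0

-- ===== PORT B =====
-- 'def s(n, i): if i == len(primes): return n*(n+1)//2; p = primes[i]; return s(n,i+1) - p*s(n//p,i+1)'
-- (recursion on the suffix primes[i:] of the prime list)
def pvS : Int → List Int → Int
  | n, [] => PySem.Int.floordiv (n * (n + 1)) 2
  | n, p :: ps => pvS n ps - p * pvS (PySem.Int.floordiv n p) ps

def sum_coprime_alt (maxn : Int) (k : Int) : Int :=
  let primes : List Int := pvCalcFactors k
  PySem.Int.mod (pvS maxn primes) pvMOD

-- ===== PRECONDITION & SPEC =====
def Spec_sum_coprime (maxn : Int) (k : Int) (out : Int) : Prop := out = sum_coprime_alt maxn k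
instance (maxn : Int) (k : Int) (out : Int) : Decidable (Spec_sum_coprime maxn k out) := by unfold Spec_sum_coprime; infer_instance

-- ===== CLAIM (what is proved, stated in full; the proofs are below) =====
def Claim_equal_sum_coprime : Prop := ∀ (maxn : Int) (k : Int), Dom_sum_coprime maxn k → Spec_sum_coprime maxn k (sum_coprime maxn k)

-- ===== LEMMAS AND PROOFS =====

-- the (product, sign) pair A extracts from the bits of b
def pvPairOf (fs : List Int) (b : Nat) : Int × Int :=
  ((pvSubsetFold b 0 fs (1, 1)).2, (pvSubsetFold b 0 fs (1, 1)).1)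

-- the signed divisor list implicit in A's bitmask order
def pvDivs (fs : List Int) : List (Int × Int) :=
  fs.foldl (fun divs f => divs ++ divs.map (fun ds => (ds.1 * f, -ds.2))) [((1 : Int), (1 : Int))]

-- one inclusion–exclusion term of A
def pvTerm (maxn : Int) (ds : Int × Int) : Int :=
  let q := PySem.Int.floordiv maxn ds.1
  PySem.Int.floordiv (ds.2 * ds.1 * q * (q + 1)) 2

lemma pvStep_eq (b i : Nat) (sm : Int × Int) (f : Int) :
    (if b &&& (1 <<< i) ≠ 0 then (-sm.1, sm.2 * f) else sm) =
      (if b.testBit i then (-sm.1, sm.2 * f) else sm) := by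
  have h : b &&& (1 <<< i) = (b.testBit i).toNat * 2 ^ i := by
    rw [Nat.one_shiftLeft, Nat.and_two_pow]
  cases hb : b.testBit i
  · rw [if_neg (by simp [h, hb]), if_neg (by simp)]
  · rw [if_pos (by simp [h, hb]), if_pos rfl]

lemma pvFold_append (b : Nat) (f : Int) (fs : List Int) : ∀ (i : Nat) (sm : Int × Int),
    pvSubsetFold b i (fs ++ [f]) sm =
      (if b.testBit (i + fs.length) then
        (-(pvSubsetFold b i fs sm).1, (pvSubsetFold b i fs sm).2 * f)
      else pvSubsetFold b i fs sm) := by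
  induction fs with
  | nil =>
    intro i sm
    show (if b &&& (1 <<< i) ≠ 0 then (-sm.1, sm.2 * f) else sm) = _
    rw [pvStep_eq]
    simp [pvSubsetFold]
  | cons g gs ih =>
    intro i sm
    show pvSubsetFold b (i + 1) (gs ++ [f]) _ = _
    rw [ih]
    have : i + 1 + gs.length = i + (g :: gs).length := by simp; omega
    rw [this]
    rfl

lemma pvFold_congr (b b' : Nat) (fs : List Int) : ∀ (i : Nat) (sm : Int × Int),
    (∀ j, i ≤ j → j < i + fs.length → b.testBit j = b'.testBit j) →
    pvSubsetFold b i fs sm = pvSubsetFold b' i fs sm := by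
  induction fs with
  | nil => intro i sm _; rfl
  | cons g gs ih =>
    intro i sm h
    show pvSubsetFold b (i + 1) gs _ = pvSubsetFold b' (i + 1) gs _
    rw [pvStep_eq, pvStep_eq, h i (Nat.le_refl i) (by simp), ih (i + 1) _
      (fun j hj1 hj2 => h j (by omega) (by simp at hj2 ⊢; omega))]

-- the divisor list enumerates exactly A's (mul, sign) pairs, in bitmask order
lemma pvDivs_eq (fs : List Int) :
    pvDivs fs = (List.range (1 <<< fs.length)).map (pvPairOf fs) := by
  induction fs using List.reverseRecOn with
  | nil => decide
  | append_singleton fs f ih =>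
    have hlen : (fs ++ [f]).length = fs.length + 1 := by simp
    have hpow : (1 : Nat) <<< (fs.length + 1) = 1 <<< fs.length + 1 <<< fs.length := by
      simp [Nat.one_shiftLeft, Nat.two_pow_succ]
    rw [pvDivs, List.foldl_append]
    show pvDivs fs ++ (pvDivs fs).map (fun ds => (ds.1 * f, -ds.2)) = _
    rw [hlen, hpow, List.range_add, List.map_append, List.map_map, ih, List.map_map]
    congr 1
    · apply List.map_congr_left
      intro b hb
      have hb' : b < 2 ^ fs.length := by
        simpa [Nat.one_shiftLeft] using List.mem_range.mp hb
      show pvPairOf fs b = pvPairOf (fs ++ [f]) b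
      unfold pvPairOf
      rw [pvFold_append, Nat.zero_add, Nat.testBit_lt_two_pow hb', if_neg (by simp)]
    · apply List.map_congr_left
      intro b hb
      have hb' : b < 2 ^ fs.length := by
        simpa [Nat.one_shiftLeft] using List.mem_range.mp hb
      show ((pvPairOf fs b).1 * f, -(pvPairOf fs b).2) = pvPairOf (fs ++ [f]) (1 <<< fs.length + b)
      have hshift : (1 : Nat) <<< fs.length + b = 2 ^ fs.length + b := by
        simp [Nat.one_shiftLeft]
      unfold pvPairOf
      rw [hshift, pvFold_append, Nat.zero_add, Nat.testBit_two_pow_add_eq,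
        Nat.testBit_lt_two_pow hb', if_pos (by simp),
        pvFold_congr (2 ^ fs.length + b) b fs 0 (1, 1)
          (fun j _ hj2 => Nat.testBit_two_pow_add_gt (by simpa using hj2) b)]

lemma pvMOD_pos : (0 : Int) < pvMOD := by norm_num [pvMOD]

lemma pvFoldl_addmod (ts : List Int) : ∀ (r : Int), ts ≠ [] →
    ts.foldl (fun a t => PySem.Int.mod (a + t) pvMOD) r = PySem.Int.mod (r + ts.sum) pvMOD := by
  induction ts with
  | nil => intro r h; exact absurd rfl h
  | cons t ts ih =>
    intro r _
    cases ts with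
    | nil => simp [List.foldl, PySem.Int.mod_eq_emod_of_pos pvMOD_pos]
    | cons u us =>
      rw [List.foldl_cons, ih _ (by simp)]
      simp only [PySem.Int.mod_eq_emod_of_pos pvMOD_pos, List.sum_cons, Int.emod_add_emod]
      ring_nf

-- every prime calc_factors emits is positive
lemma pvCFInner_mem (f : Nat) (n m : Int) (ret : PySem.Set Int) :
    ∀ x ∈ (pvCFInner f n m ret).2, x ∈ ret ∨ x = m := by
  induction f generalizing n ret with
  | zero => intro x hx; exact Or.inl hx
  | succ f ih =>
    intro x hx
    by_cases h : PySem.Int.mod n m = 0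
    · simp only [pvCFInner, if_pos h] at hx
      rcases ih _ _ x hx with h' | h'
      · rcases (PySem.Set.mem_add _ _ _).mp h' with h'' | h''
        · exact Or.inl h''
        · exact Or.inr h''
      · exact Or.inr h'
    · simp only [pvCFInner, if_neg h] at hx
      exact Or.inl hx

lemma pvCFOuter_mem (f : Nat) (n m : Int) (ret : PySem.Set Int) (hm : 2 ≤ m) :
    ∀ x ∈ (pvCFOuter f n m ret).2, x ∈ ret ∨ 2 ≤ x := by
  induction f generalizing n m ret with
  | zero => intro x hx; exact Or.inl hx
  | succ f ih =>
    intro x hx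
    by_cases h : m * m ≤ n
    · simp only [pvCFOuter, if_pos h] at hx
      rcases ih _ _ _ (by omega) x hx with h' | h'
      · rcases pvCFInner_mem _ _ _ _ x h' with h'' | h''
        · exact Or.inl h''
        · exact Or.inr (h'' ▸ hm)
      · exact Or.inr h'
    · simp only [pvCFOuter, if_neg h] at hx
      exact Or.inl hx

lemma pvCalcFactors_pos (k : Int) : ∀ x ∈ (pvCalcFactors k : List Int), 0 < x := by
  intro x hx
  unfold pvCalcFactors at hx
  set p := pvCFOuter (k.natAbs + 2) k 2 PySem.Set.empty with hp
  by_cases h1 : p.1 > 1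
  · rw [if_pos h1] at hx
    rcases (PySem.Set.mem_add _ _ _).mp hx with h | h
    · rcases pvCFOuter_mem _ _ _ _ (le_refl 2) x h with h' | h'
      · simp [PySem.Set.empty] at h'
      · omega
    · omega
  · rw [if_neg h1] at hx
    rcases pvCFOuter_mem _ _ _ _ (le_refl 2) x hx with h' | h'
    · simp [PySem.Set.empty] at h'
    · omega

-- A's term is sign * mul * T(maxn // mul) (the //2 is exact since q*(q+1) is even)
lemma pvTerm_eq (N : Int) (ds : Int × Int) :
    pvTerm N ds = ds.2 * ds.1 * pvS (PySem.Int.floordiv N ds.1) [] := by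
  unfold pvTerm pvS
  set q := PySem.Int.floordiv N ds.1 with hq
  obtain ⟨t, ht'⟩ := Int.even_mul_succ_self q
  have ht : q * (q + 1) = 2 * t := by omega
  have h2 : (0 : Int) < 2 := by norm_num
  rw [PySem.Int.floordiv_eq_ediv_of_pos h2, PySem.Int.floordiv_eq_ediv_of_pos h2]
  have : ds.2 * ds.1 * q * (q + 1) = 2 * (ds.2 * ds.1 * t) := by rw [mul_assoc, ht]; ring
  rw [this, ht, Int.mul_ediv_cancel_left _ (by norm_num), Int.mul_ediv_cancel_left _ (by norm_num)]

-- the key invariant: summing A's terms over the divisor list built from any accumulator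
-- equals the accumulator-weighted sum of B's recursion
lemma pvDivs_sum (fs : List Int) (hfs : ∀ p ∈ fs, 0 < p) :
    ∀ (acc : List (Int × Int)), (∀ ds ∈ acc, 0 < ds.1) → ∀ (N : Int),
    ((fs.foldl (fun divs f => divs ++ divs.map (fun ds => (ds.1 * f, -ds.2))) acc).map
      (pvTerm N)).sum
      = (acc.map (fun ds => ds.2 * ds.1 * pvS (PySem.Int.floordiv N ds.1) fs)).sum := by
  induction fs with
  | nil =>
    intro acc _ N
    simp only [List.foldl_nil]
    congr 1
    exact List.map_congr_left (fun ds _ => pvTerm_eq N ds)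
  | cons f fs ih =>
    intro acc hacc N
    have hf : 0 < f := hfs f (by simp)
    have hfs' : ∀ p ∈ fs, 0 < p := fun p hp => hfs p (by simp [hp])
    rw [List.foldl_cons, ih hfs' _ (by
      intro ds hds
      rcases List.mem_append.mp hds with h | h
      · exact hacc ds h
      · obtain ⟨es, hes, rfl⟩ := List.mem_map.mp h
        exact mul_pos (hacc es hes) hf) N]
    rw [List.map_append, List.sum_append, List.map_map]
    have hsplit : ∀ ds ∈ acc,
        (ds.2 * ds.1 * pvS (PySem.Int.floordiv N ds.1) (f :: fs)) =
          ds.2 * ds.1 * pvS (PySem.Int.floordiv N ds.1) fs +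
          ((fun ds => ds.2 * ds.1 * pvS (PySem.Int.floordiv N ds.1) fs) ∘
            (fun ds => (ds.1 * f, -ds.2))) ds := by
      intro ds hds
      have hd : 0 < ds.1 := hacc ds hds
      have hcomp : PySem.Int.floordiv (PySem.Int.floordiv N ds.1) f
          = PySem.Int.floordiv N (ds.1 * f) := by
        rw [PySem.Int.floordiv_eq_ediv_of_pos hd, PySem.Int.floordiv_eq_ediv_of_pos hf,
          PySem.Int.floordiv_eq_ediv_of_pos (mul_pos hd hf),
          Int.ediv_ediv_of_nonneg (le_of_lt hd)]
      show _ = _ + (-ds.2) * (ds.1 * f) * pvS (PySem.Int.floordiv N (ds.1 * f)) fs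
      rw [← hcomp]
      simp only [pvS]
      ring
    rw [List.map_congr_left hsplit, PySem.List.sum_map_add_int]

-- ===== VERDICT (by name: the statement is the Claim_ definition above) =====
theorem sum_coprime_spec : Claim_equal_sum_coprime := by
  intro maxn k _
  show sum_coprime maxn k = sum_coprime_alt maxn k
  rw [sum_coprime, sum_coprime_alt]
  have hA : (List.range (1 <<< (pvCalcFactors k : List Int).length)).foldl
      (fun ret b =>
        let sm := pvSubsetFold b 0 (pvCalcFactors k) (1, 1)
        let q := PySem.Int.floordiv maxn sm.2
        PySem.Int.mod (ret + PySem.Int.floordiv (sm.1 * sm.2 * q * (q + 1)) 2) pvMOD) 0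
      = ((List.range (1 <<< (pvCalcFactors k : List Int).length)).map
          (fun b => pvTerm maxn (pvPairOf (pvCalcFactors k) b))).foldl
          (fun a t => PySem.Int.mod (a + t) pvMOD) 0 := by
    rw [List.foldl_map]
    rfl
  rw [hA, pvFoldl_addmod _ 0 (by simp [Nat.one_shiftLeft, List.range_eq_nil])]
  have hsum : ((List.range (1 <<< (pvCalcFactors k : List Int).length)).map
        (fun b => pvTerm maxn (pvPairOf (pvCalcFactors k) b))).sum
      = pvS maxn (pvCalcFactors k) := by
    have h1 : ((pvDivs (pvCalcFactors k)).map (pvTerm maxn)).sum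
        = ((List.range (1 <<< (pvCalcFactors k : List Int).length)).map
            (fun b => pvTerm maxn (pvPairOf (pvCalcFactors k) b))).sum := by
      rw [pvDivs_eq, List.map_map]; rfl
    rw [← h1]
    rw [pvDivs, pvDivs_sum _ (pvCalcFactors_pos k) _
      (by intro ds hds; simp only [List.mem_singleton] at hds; subst hds; norm_num)]
    simp
  rw [hsum, Int.zero_add]
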